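-- pv_equiv track=rewrite | github.com/cyber35590/PyDecalogApi | PyDCoteChanger.py | tiret_to_space
-- ===== SOURCE A (Python) =====
-- def tiret_to_space(cote):
--     out=""
--     for c in cote:
--         if c=='-' or c==' ':
--             if len(out)>00 and out[-1]!=' ':
--                 out+=' '
--         else:
--             out+=c
--     return out
-- ===== SOURCE B (Python) =====
-- import re
--
-- def tiret_to_space(cote):
--     return re.sub(r'[- ]+', ' ', cote).lstrip(' ')
-- ===== Notes on version B (the rewrite author's own statement) =====
-- stated objective: idiomatic
-- what changed: Replaces the char-by-char loop with last-char bookkeeping by a single regex substitution collapsing each maximal run of dashes/spaces into one space, followed by lstrip(' ') for a leading run.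
import Mathlib
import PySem

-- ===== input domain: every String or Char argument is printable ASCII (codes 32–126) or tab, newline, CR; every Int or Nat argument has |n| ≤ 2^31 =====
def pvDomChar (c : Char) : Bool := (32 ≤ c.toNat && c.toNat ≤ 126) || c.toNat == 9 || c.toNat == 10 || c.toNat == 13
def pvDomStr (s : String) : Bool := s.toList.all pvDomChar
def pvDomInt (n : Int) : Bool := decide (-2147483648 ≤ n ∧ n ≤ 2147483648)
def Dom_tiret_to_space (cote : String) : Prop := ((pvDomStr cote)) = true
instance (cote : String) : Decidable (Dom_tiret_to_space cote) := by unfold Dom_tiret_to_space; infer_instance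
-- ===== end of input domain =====

-- B replaces A's char-by-char loop (with last-character bookkeeping) by a single regex
-- substitution collapsing each run of '-'/' ' into one space, then lstrip(' ').
-- The return values are proved equal on every input in the domain.

-- ===== PORT A =====
-- literal port of A: fold over the characters, appending to `out`;
-- `out[-1]` is ported as PySem.List.pyGet? out (-1)
def tiret_to_space (cote : String) : String :=
  String.mk (cote.toList.foldl (fun out c =>
    if c = '-' ∨ c = ' ' then
      if 0 < out.length ∧ PySem.List.pyGet? out (-1) ≠ some ' ' then out ++ [' ']
      else out
    else out ++ [c]) [])

-- ===== PORT B =====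
-- hand port of re.sub(r'[- ]+', ' ', cote): each maximal run of '-'/' ' becomes one ' '
-- (exact for this fixed pattern: emit ' ' at the run's head, skip the rest of the run)
def pvIsRun (c : Char) : Bool := c = '-' || c = ' '

def pvCollapse : List Char → List Char
  | [] => []
  | c :: rest =>
    if pvIsRun c then ' ' :: pvCollapse (rest.dropWhile pvIsRun)
    else c :: pvCollapse rest
termination_by l => l.length
decreasing_by
  · exact Nat.lt_succ_of_le (List.length_dropWhile_le _ _)
  · simp

-- .lstrip(' ') drops exactly the leading ' ' characters (exact: the argument is ' ')
def tiret_to_space_alt (cote : String) : String :=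
  String.mk ((pvCollapse cote.toList).dropWhile (fun c => c = ' '))

-- ===== PRECONDITION & SPEC =====
def Spec_tiret_to_space (cote : String) (out : String) : Prop := out = tiret_to_space_alt cote
instance (cote : String) (out : String) : Decidable (Spec_tiret_to_space cote out) := by unfold Spec_tiret_to_space; infer_instance

-- ===== CLAIM (what is proved, stated in full; the proofs are below) =====
def Claim_equal_tiret_to_space : Prop := ∀ (cote : String), Dom_tiret_to_space cote → Spec_tiret_to_space cote (tiret_to_space cote)

-- ===== LEMMAS AND PROOFS =====

-- proof-only model of A's loop: `s` = "suppress the separator" (out empty or ends in ' ')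
def pvRun (s : Bool) : List Char → List Char
  | [] => []
  | c :: rest =>
    if pvIsRun c then
      (if s then pvRun true rest else ' ' :: pvRun true rest)
    else c :: pvRun false rest

lemma pvIsRun_iff (c : Char) : pvIsRun c = true ↔ (c = '-' ∨ c = ' ') := by
  simp [pvIsRun]

-- the state bit of an accumulator
def pvS (acc : List Char) : Bool := acc.isEmpty || acc.getLast? == some ' '

lemma pvS_append_space (acc : List Char) : pvS (acc ++ [' ']) = true := by
  simp [pvS]

lemma pvS_append_char (acc : List Char) (c : Char) (h : c ≠ ' ') :
    pvS (acc ++ [c]) = false := by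
  simp [pvS, h]

lemma pvS_iff (acc : List Char) :
    (0 < acc.length ∧ PySem.List.pyGet? acc (-1) ≠ some ' ') ↔ pvS acc = false := by
  cases acc with
  | nil => simp [pvS]
  | cons a as =>
    simp only [PySem.List.pyGet?_neg_one, pvS]
    constructor
    · rintro ⟨-, h2⟩
      simp [List.isEmpty]
      intro h; exact (h2 h).elim
    · intro h
      refine ⟨by simp, ?_⟩
      simp [List.isEmpty] at h
      simpa using h

-- A's fold equals acc ++ pvRun (pvS acc) l
lemma foldA (l : List Char) : ∀ acc : List Char,
    l.foldl (fun out c =>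
      if c = '-' ∨ c = ' ' then
        if 0 < out.length ∧ PySem.List.pyGet? out (-1) ≠ some ' ' then out ++ [' ']
        else out
      else out ++ [c]) acc = acc ++ pvRun (pvS acc) l := by
  induction l with
  | nil => intro acc; simp [pvRun]
  | cons c rest ih =>
    intro acc
    rw [List.foldl_cons]
    by_cases hr : pvIsRun c = true
    · have hc : c = '-' ∨ c = ' ' := (pvIsRun_iff c).mp hr
      by_cases hs : pvS acc = false
      · rw [if_pos hc, if_pos ((pvS_iff acc).mpr hs), ih, pvS_append_space]
        simp [pvRun, hr, hs, List.append_assoc]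
      · have hs' : pvS acc = true := by revert hs; cases h : pvS acc <;> simp
        have hnot : ¬ (0 < acc.length ∧ PySem.List.pyGet? acc (-1) ≠ some ' ') := by
          rw [pvS_iff, hs']; simp
        rw [if_pos hc, if_neg hnot, ih, hs']
        simp [pvRun, hr]
    · have hc : ¬ (c = '-' ∨ c = ' ') := fun h => hr ((pvIsRun_iff c).mpr h)
      have hc' : c ≠ ' ' := fun h => hc (Or.inr h)
      rw [if_neg hc, ih, pvS_append_char acc c hc']
      simp [pvRun, hr, List.append_assoc]

-- pvRun true l = pvRun false (l.dropWhile pvIsRun)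
lemma pvRun_true_drop (l : List Char) : pvRun true l = pvRun false (l.dropWhile pvIsRun) := by
  induction l with
  | nil => simp [pvRun]
  | cons c rest ih =>
    by_cases hr : pvIsRun c = true
    · simp [pvRun, hr, List.dropWhile, ih]
    · have hr' : pvIsRun c = false := by revert hr; cases h : pvIsRun c <;> simp
      simp [pvRun, hr', List.dropWhile]

-- pvCollapse computes pvRun false
lemma pvCollapse_eq_aux : ∀ n (l : List Char), l.length ≤ n → pvCollapse l = pvRun false l := by
  intro n
  induction n with
  | zero =>
    intro l hl
    have : l = [] := by cases l <;> simp_all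
    subst this; simp [pvCollapse, pvRun]
  | succ n ih =>
    intro l hl
    cases l with
    | nil => simp [pvCollapse, pvRun]
    | cons c rest =>
      have hrest : rest.length ≤ n := by simpa using hl
      by_cases hr : pvIsRun c = true
      · rw [pvCollapse, if_pos hr,
            ih _ (le_trans (List.length_dropWhile_le _ _) hrest), ← pvRun_true_drop]
        simp [pvRun, hr]
      · rw [pvCollapse, if_neg hr, ih _ hrest]
        simp [pvRun, hr]

lemma pvCollapse_eq (l : List Char) : pvCollapse l = pvRun false l :=
  pvCollapse_eq_aux l.length l le_rfl

-- pvRun true never starts with a space, so dropWhile ' ' is identity on it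
lemma pvRun_true_no_lead (l : List Char) :
    (pvRun true l).dropWhile (fun c => c = ' ') = pvRun true l := by
  induction l with
  | nil => simp [pvRun]
  | cons c rest ih =>
    by_cases hr : pvIsRun c = true
    · simp [pvRun, hr, ih]
    · have hc' : c ≠ ' ' := by
        intro h; exact hr ((pvIsRun_iff c).mpr (Or.inr h))
      simp [pvRun, hr, hc']

-- stripping the leading space off pvRun false gives pvRun true
lemma pvRun_false_drop (l : List Char) :
    (pvRun false l).dropWhile (fun c => c = ' ') = pvRun true l := by
  cases l with
  | nil => simp [pvRun]
  | cons c rest =>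
    by_cases hr : pvIsRun c = true
    · simp [pvRun, hr, pvRun_true_no_lead]
    · have hc' : c ≠ ' ' := by
        intro h; exact hr ((pvIsRun_iff c).mpr (Or.inr h))
      simp [pvRun, hr, hc']

-- ===== VERDICT (by name: the statement is the Claim_ definition above) =====
theorem tiret_to_space_spec : Claim_equal_tiret_to_space := by
  intro cote _
  unfold Spec_tiret_to_space tiret_to_space tiret_to_space_alt
  rw [foldA, pvCollapse_eq, pvRun_false_drop]
  simp [pvS]
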